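-- pv_equiv track=rewrite | github.com/MrHamdulay/csc3-capstone | examples/data/Assignment_8/frndav011/question2.py | rep_char
-- ===== SOURCE A (Python) =====
-- def rep_char(c):
--     if len(c) == 1:#Base case
--         return 0
--     elif  len(c) > 2 and c[0] == c[1] and c[0] == c[2] :
--         return rep_char(c[2:]) + 1
--     elif c[0] == c[1]:
--         return rep_char(c[1:]) + 1
--     else:
--         return rep_char(c[1:])
-- ===== SOURCE B (Python) =====
-- def rep_char(c):
--     # single forward pass over maximal runs: add run//2 per run
--     prev = c[0]
--     run = 1
--     total = 0
--     for ch in c[1:]: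
--         if ch == prev:
--             run += 1
--         else:
--             total += run // 2
--             run = 1
--             prev = ch
--     return total + run // 2
-- ===== Notes on version B (the rewrite author's own statement) =====
-- stated objective: faster
-- what changed: Replaced A's pair-skipping recursion with repeated string slicing by a single iterative pass that run-length groups the string and adds floor(run/2) per maximal run.
import Mathlib
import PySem

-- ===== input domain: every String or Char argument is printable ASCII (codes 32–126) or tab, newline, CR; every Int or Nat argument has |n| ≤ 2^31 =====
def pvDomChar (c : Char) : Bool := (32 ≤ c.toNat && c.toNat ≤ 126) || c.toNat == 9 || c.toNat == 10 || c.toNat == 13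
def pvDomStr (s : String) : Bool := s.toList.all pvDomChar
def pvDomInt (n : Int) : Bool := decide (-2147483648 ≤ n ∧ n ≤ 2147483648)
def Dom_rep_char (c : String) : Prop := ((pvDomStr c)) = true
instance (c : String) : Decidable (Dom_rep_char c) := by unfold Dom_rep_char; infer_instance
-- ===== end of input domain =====

-- B replaces A's pair-skipping recursion over string slices with a single O(n) run-length pass adding run//2 per maximal run.


-- ===== PORT A =====
-- literal transliteration of A's recursion; on [] Python raises IndexError (excluded by Pre_)
def repCharAux : List Char → Int
  | [] => 0            -- Python raises IndexError here; excluded by Pre_rep_char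
  | [_] => 0           -- len(c) == 1
  | a :: b :: [] =>    -- len == 2: 'len > 2' branch fails
    if a = b then repCharAux [b] + 1 else repCharAux [b]
  | a :: b :: d :: rest =>
    if a = b ∧ a = d then repCharAux (d :: rest) + 1
    else if a = b then repCharAux (b :: d :: rest) + 1
    else repCharAux (b :: d :: rest)

def rep_char (c : String) : Int := repCharAux c.toList

-- ===== PORT B =====
-- B's loop: prev, run, total over the tail of the string
def repCharRun : Char → Int → Int → List Char → Int
  | _, run, total, [] => total + PySem.Int.floordiv run 2
  | prev, run, total, ch :: rest =>
    if ch = prev then repCharRun prev (run + 1) total rest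
    else repCharRun ch 1 (total + PySem.Int.floordiv run 2) rest

def rep_char_alt (c : String) : Int :=
  match c.toList with
  | [] => 0            -- Python B raises IndexError here (prev = c[0]); excluded by Pre_rep_char
  | p :: rest => repCharRun p 1 0 rest

-- ===== PRECONDITION & SPEC =====
-- Pre_ excludes only the empty string, on which both A and B raise IndexError.
def Pre_rep_char (c : String) : Prop := c.toList ≠ []
instance (c : String) : Decidable (Pre_rep_char c) := by unfold Pre_rep_char; infer_instance
def pvWitness_rep_char : String := "aabbb"

def Spec_rep_char (c : String) (out : Int) : Prop := out = rep_char_alt c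
instance (c : String) (out : Int) : Decidable (Spec_rep_char c out) := by unfold Spec_rep_char; infer_instance

-- ===== CLAIM (what is proved, stated in full; the proofs are below) =====
def Claim_equal_rep_char : Prop := ∀ (c : String), Dom_rep_char c → Pre_rep_char c → Spec_rep_char c (rep_char c)

-- ===== LEMMAS AND PROOFS =====

-- A on a pure run of length n+1 yields (n+1)//2
theorem repCharAux_replicate (p : Char) (n : Nat) :
    repCharAux (List.replicate (n + 1) p) = PySem.Int.floordiv ((n : Int) + 1) 2 := by
  match n with
  | 0 =>
    rw [show List.replicate (0 + 1) p = [p] from rfl,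
        show repCharAux [p] = 0 from rfl,
        PySem.Int.floordiv_eq_ediv_of_pos (by omega)]
    norm_num
  | 1 =>
    rw [show List.replicate (1 + 1) p = [p, p] from rfl,
        show repCharAux [p, p] = repCharAux [p] + 1 from by simp [repCharAux],
        show repCharAux [p] = 0 from rfl,
        PySem.Int.floordiv_eq_ediv_of_pos (by omega)]
    norm_num
  | Nat.succ (Nat.succ m) =>
    have ih := repCharAux_replicate p m
    rw [show List.replicate (m + 1 + 1 + 1) p = p :: p :: p :: List.replicate m p from by
          simp [List.replicate_succ],
        show repCharAux (p :: p :: p :: List.replicate m p) =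
            repCharAux (p :: List.replicate m p) + 1 from by simp [repCharAux],
        show p :: List.replicate m p = List.replicate (m + 1) p from by
          simp [List.replicate_succ],
        ih,
        PySem.Int.floordiv_eq_ediv_of_pos (by omega),
        PySem.Int.floordiv_eq_ediv_of_pos (by omega)]
    push_cast
    omega
termination_by n

-- A on a run of p's followed by a different char: the run contributes (n+1)//2 independently
theorem repCharAux_replicate_append (p ch : Char) (r : List Char) (n : Nat) (h : ch ≠ p) :
    repCharAux (List.replicate (n + 1) p ++ ch :: r) =
      PySem.Int.floordiv ((n : Int) + 1) 2 + repCharAux (ch :: r) := by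
  have h' : ¬ p = ch := Ne.symm h
  match n with
  | 0 =>
    cases r with
    | nil =>
      rw [show List.replicate (0 + 1) p ++ [ch] = [p, ch] from rfl,
          show repCharAux [p, ch] = repCharAux [ch] from by simp [repCharAux, h'],
          PySem.Int.floordiv_eq_ediv_of_pos (by omega)]
      norm_num
    | cons d t =>
      rw [show List.replicate (0 + 1) p ++ ch :: d :: t = p :: ch :: d :: t from rfl,
          show repCharAux (p :: ch :: d :: t) = repCharAux (ch :: d :: t) from by
            simp [repCharAux, h'],
          PySem.Int.floordiv_eq_ediv_of_pos (by omega)]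
      norm_num
  | 1 =>
    have ih := repCharAux_replicate_append p ch r 0 h
    rw [show List.replicate (1 + 1) p ++ ch :: r = p :: p :: ch :: r from rfl,
        show repCharAux (p :: p :: ch :: r) = repCharAux (p :: ch :: r) + 1 from by
          simp [repCharAux, h'],
        show p :: ch :: r = List.replicate (0 + 1) p ++ ch :: r from rfl, ih,
        PySem.Int.floordiv_eq_ediv_of_pos (by omega),
        PySem.Int.floordiv_eq_ediv_of_pos (by omega)]
    push_cast
    omega
  | Nat.succ (Nat.succ m) =>
    have ih := repCharAux_replicate_append p ch r m h
    rw [show List.replicate (m + 1 + 1 + 1) p ++ ch :: r =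
            p :: p :: p :: (List.replicate m p ++ ch :: r) from by simp [List.replicate_succ],
        show repCharAux (p :: p :: p :: (List.replicate m p ++ ch :: r)) =
            repCharAux (p :: (List.replicate m p ++ ch :: r)) + 1 from by simp [repCharAux],
        show p :: (List.replicate m p ++ ch :: r) = List.replicate (m + 1) p ++ ch :: r from by
          simp [List.replicate_succ],
        ih,
        PySem.Int.floordiv_eq_ediv_of_pos (by omega),
        PySem.Int.floordiv_eq_ediv_of_pos (by omega)]
    push_cast
    omega
termination_by n

-- loop invariant: B's pass equals total plus A's value on the pending run followed by the rest
theorem repCharRun_eq (rest : List Char) : ∀ (p : Char) (n : Nat) (total : Int),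
    repCharRun p ((n : Int) + 1) total rest = total + repCharAux (List.replicate (n + 1) p ++ rest) := by
  induction rest with
  | nil =>
    intro p n total
    simp [repCharRun, repCharAux_replicate]
  | cons ch r ih =>
    intro p n total
    by_cases hc : ch = p
    · subst hc
      have := ih ch (n + 1) total
      push_cast at this
      simp only [repCharRun]
      rw [show ((n : Int) + 1 + 1) = ((n : Int) + 1 + 1) from rfl, this]
      rw [show List.replicate (n + 1 + 1) ch = List.replicate (n + 1) ch ++ [ch] from
        List.replicate_succ' (n := n + 1) (a := ch)]
      simp
    · have := ih ch 0 (total + PySem.Int.floordiv ((n : Int) + 1) 2)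
      simp only [Nat.cast_zero, zero_add] at this
      simp only [repCharRun, if_neg hc]
      rw [this, repCharAux_replicate_append p ch r n hc]
      simp [List.replicate]
      ring

-- ===== VERDICT (by name: the statement is the Claim_ definition above) =====
theorem rep_char_spec : Claim_equal_rep_char := by
  intro c _ hpre
  unfold Spec_rep_char rep_char rep_char_alt
  cases hl : c.toList with
  | nil => exact absurd hl hpre
  | cons p rest =>
    have := repCharRun_eq rest p 0 0
    simp at this
    simp [this]
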